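-- pv_equiv track=rewrite | github.com/delimit-ai/delimit-mcp-server | gateway/ai/reddit_scanner.py | _relevance_tags
-- ===== SOURCE A (Python) =====
-- from typing import Any, Dict, List, Optional, Tuple
--
-- def _relevance_tags(title: str, selftext: str, venture_keywords: Dict[str, List[str]]) -> List[str]:
--     """Return list of matching keyword tags from the post text."""
--     combined = (title + " " + selftext).lower()
--     tags: List[str] = []
--     for _venture, keywords in venture_keywords.items():
--         for kw in keywords:
--             if kw in combined and kw not in tags:
--                 tags.append(kw)
--     return tags
-- ===== SOURCE B (Python) =====
-- def _relevance_tags(title, selftext, venture_keywords):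
--     """Return list of matching keyword tags from the post text."""
--     combined = (title + " " + selftext).lower()
--     ordered = list(dict.fromkeys(kw for kws in venture_keywords.values() for kw in kws))
--     lengths = {len(kw) for kw in ordered}
--     n = len(combined)
--     found = set()
--     for L in lengths:
--         for i in range(n - L + 1):
--             found.add(combined[i:i + L])
--     return [kw for kw in ordered if kw in found]
-- ===== Notes on version B (the rewrite author's own statement) =====
-- stated objective: faster
-- what changed: Instead of scanning the whole text once per keyword, B deduplicates the keywords up front, builds a hash set of all substrings of the text whose lengths occur among the keywords (one pass per distinct keyword length), and then emits the keywords in first-occurrence order by O(1) set lookups.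
import Mathlib
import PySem

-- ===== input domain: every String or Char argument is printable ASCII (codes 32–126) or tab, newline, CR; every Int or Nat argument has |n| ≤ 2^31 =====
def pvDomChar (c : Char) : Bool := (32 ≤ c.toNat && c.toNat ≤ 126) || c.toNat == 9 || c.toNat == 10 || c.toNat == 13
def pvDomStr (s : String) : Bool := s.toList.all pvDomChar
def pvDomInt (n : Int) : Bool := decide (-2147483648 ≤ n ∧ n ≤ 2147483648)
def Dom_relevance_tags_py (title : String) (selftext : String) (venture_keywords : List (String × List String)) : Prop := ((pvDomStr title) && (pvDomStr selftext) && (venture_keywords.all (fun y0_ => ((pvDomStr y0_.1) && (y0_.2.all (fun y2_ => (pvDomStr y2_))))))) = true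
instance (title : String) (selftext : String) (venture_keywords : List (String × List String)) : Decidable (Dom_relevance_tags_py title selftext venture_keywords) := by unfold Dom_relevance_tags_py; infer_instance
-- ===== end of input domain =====

-- B replaces A's per-keyword substring scans by indexing all substrings of the relevant
-- lengths in a hash set (one pass per distinct keyword length), then filtering the
-- deduplicated keywords in original order by set lookups (objective: faster; measured so).


-- ===== PORT A =====
def relevance_tags_py (title : String) (selftext : String) (venture_keywords : List (String × List String)) : List String :=
  let combined := PySem.Chars.lower (title.toList ++ [' '] ++ selftext.toList)
  venture_keywords.foldl (fun tags p =>
    p.2.foldl (fun tags kw =>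
      if PySem.Chars.isIn kw.toList combined && !(tags.contains kw) then tags ++ [kw] else tags) tags) []

-- ===== PORT B =====
def relevance_tags_py_alt (title : String) (selftext : String) (venture_keywords : List (String × List String)) : List String :=
  let combined := PySem.Chars.lower (title.toList ++ [' '] ++ selftext.toList)
  let ordered := PySem.List.dedup (venture_keywords.flatMap (fun p => p.2))
  let lengths : PySem.Set Int := PySem.Set.ofList (ordered.map PySem.Str.len)
  let n : Int := combined.length
  let found : PySem.Set (List Char) :=
    lengths.foldl (fun fnd L =>
      (PySem.List.pyRange 0 (n - L + 1) 1).foldl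
        (fun fnd i => PySem.Set.add fnd (PySem.List.slice combined (some i) (some (i + L)))) fnd)
      PySem.Set.empty
  ordered.filter (fun kw => PySem.Set.contains found kw.toList)

-- ===== PRECONDITION & SPEC =====
def Spec_relevance_tags_py (title : String) (selftext : String) (venture_keywords : List (String × List String)) (out : List String) : Prop := out = relevance_tags_py_alt title selftext venture_keywords
instance (title : String) (selftext : String) (venture_keywords : List (String × List String)) (out : List String) : Decidable (Spec_relevance_tags_py title selftext venture_keywords out) := by unfold Spec_relevance_tags_py; infer_instance

-- ===== CLAIM (what is proved, stated in full; the proofs are below) =====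
def Claim_equal_relevance_tags_py : Prop := ∀ (title : String) (selftext : String) (venture_keywords : List (String × List String)), Dom_relevance_tags_py title selftext venture_keywords → Spec_relevance_tags_py title selftext venture_keywords (relevance_tags_py title selftext venture_keywords)

-- ===== LEMMAS AND PROOFS =====

-- A's loop body is exactly "if the keyword matches, Set.add it".
theorem stepA_eq_add (c : List Char) (tags : List String) (kw : String) :
    (if PySem.Chars.isIn kw.toList c && !(tags.contains kw) then tags ++ [kw] else tags)
      = if PySem.Chars.isIn kw.toList c then PySem.Set.add tags kw else tags := by
  simp only [PySem.Set.add, PySem.Set.contains]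
  cases hin : PySem.Chars.isIn kw.toList c
  · simp
  · simp

-- conditional Set.add accumulation = Set.add over the filtered list
theorem foldl_ite_add (p : String → Bool) (l : List String) (acc : List String) :
    l.foldl (fun tags kw => if p kw then PySem.Set.add tags kw else tags) acc
      = (l.filter p).foldl PySem.Set.add acc := by
  induction l generalizing acc with
  | nil => rfl
  | cons x l ih =>
      by_cases h : p x <;> simp [h, ih]

theorem filter_add {α : Type} [BEq α] [LawfulBEq α] (p : α → Bool) (s : PySem.Set α) (x : α) :
    (PySem.Set.add s x).filter p = if p x then PySem.Set.add (s.filter p) x else s.filter p := by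
  simp only [PySem.Set.add, PySem.Set.contains, List.contains_iff_mem]
  by_cases hx : x ∈ s
  · by_cases hp : p x = true
    · have hm : x ∈ List.filter p s := List.mem_filter.mpr ⟨hx, hp⟩
      simp [hx, hp, hm]
    · simp [hx, hp]
  · by_cases hp : p x = true
    · have hnx : x ∉ List.filter p s := fun h => hx (List.mem_filter.mp h).1
      simp [hx, hp, hnx, List.filter_append]
    · simp [hx, hp, List.filter_append]

-- filtering commutes with deduplicating accumulation
theorem filter_foldl_add {α : Type} [BEq α] [LawfulBEq α] (p : α → Bool) (l : List α) (s : PySem.Set α) :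
    (l.foldl PySem.Set.add s).filter p = (l.filter p).foldl PySem.Set.add (s.filter p) := by
  induction l generalizing s with
  | nil => rfl
  | cons x l ih =>
      simp only [List.foldl_cons, ih, filter_add, List.filter_cons]
      by_cases hp : p x <;> simp [hp]

-- membership in a fold of Set.add's
theorem mem_foldl_add {α β : Type} [BEq α] [LawfulBEq α] (g : β → α) (l : List β) (s : PySem.Set α) (x : α) :
    x ∈ l.foldl (fun s a => PySem.Set.add s (g a)) s ↔ x ∈ s ∨ ∃ a ∈ l, g a = x := by
  induction l generalizing s with
  | nil => simp
  | cons b l ih =>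
      simp only [List.foldl_cons, ih, PySem.Set.mem_add, List.mem_cons]
      aesop

-- membership in B's "found" set
theorem mem_found (c : List Char) (lens : List Int) (s : PySem.Set (List Char)) (x : List Char) :
    x ∈ lens.foldl (fun fnd L =>
        (PySem.List.pyRange 0 ((c.length : Int) - L + 1) 1).foldl
          (fun fnd i => PySem.Set.add fnd (PySem.List.slice c (some i) (some (i + L)))) fnd) s
      ↔ x ∈ s ∨ ∃ L ∈ lens, ∃ i ∈ PySem.List.pyRange 0 ((c.length : Int) - L + 1) 1,
          PySem.List.slice c (some i) (some (i + L)) = x := by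
  induction lens generalizing s with
  | nil => simp
  | cons L lens ih =>
      simp only [List.foldl_cons, ih, mem_foldl_add, List.mem_cons]
      aesop

-- anything in "found" is a substring of c
theorem found_isIn (c : List Char) (x : List Char) (L i : Int)
    (hi : i ∈ PySem.List.pyRange 0 ((c.length : Int) - L + 1) 1) (hL : 0 ≤ L)
    (hx : PySem.List.slice c (some i) (some (i + L)) = x) :
    PySem.Chars.isIn x c = true := by
  rw [PySem.List.mem_pyRange_one] at hi
  obtain ⟨hi0, _⟩ := hi
  obtain ⟨j, rfl⟩ : ∃ j : Nat, i = (j : Int) := ⟨i.toNat, (Int.toNat_of_nonneg hi0).symm⟩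
  obtain ⟨Ln, rfl⟩ : ∃ m : Nat, L = (m : Int) := ⟨L.toNat, (Int.toNat_of_nonneg hL).symm⟩
  rw [PySem.List.slice_natCast_add] at hx
  rw [← PySem.Chars.exists_prefix_drop_iff_isIn]
  exact ⟨j, hx ▸ List.take_prefix _ _⟩

-- any keyword of recorded length that is a substring of c lands in "found"
theorem isIn_found (c : List Char) (kw : List Char)
    (h : PySem.Chars.isIn kw c = true) :
    ∃ i ∈ PySem.List.pyRange 0 ((c.length : Int) - (kw.length : Int) + 1) 1,
      PySem.List.slice c (some i) (some (i + (kw.length : Int))) = kw := by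
  rw [← PySem.Chars.exists_prefix_drop_iff_isIn] at h
  obtain ⟨j, hj⟩ := h
  have hj' : kw <+: c.drop (min j c.length) := by
    rcases le_or_gt j c.length with hle | hgt
    · simpa [Nat.min_eq_left hle] using hj
    · have : c.drop j = [] := List.drop_eq_nil_of_le (le_of_lt hgt)
      have hkw : kw = [] := List.prefix_nil.mp (this ▸ hj)
      simp [hkw]
  set j₀ := min j c.length with hj₀
  have hlen : kw.length ≤ c.length - j₀ := by
    have := hj'.length_le
    simpa using this
  have hj₀le : j₀ ≤ c.length := Nat.min_le_right _ _
  refine ⟨(j₀ : Int), ?_, ?_⟩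
  · rw [PySem.List.mem_pyRange_one]
    constructor
    · exact Int.natCast_nonneg _
    · omega
  · rw [PySem.List.slice_natCast_add]
    exact (List.prefix_iff_eq_take.mp hj').symm

-- ===== VERDICT (by name: the statement is the Claim_ definition above) =====
theorem relevance_tags_py_spec : Claim_equal_relevance_tags_py := by
  intro title selftext vk _
  unfold Spec_relevance_tags_py relevance_tags_py relevance_tags_py_alt
  set c := PySem.Chars.lower (title.toList ++ [' '] ++ selftext.toList) with hc
  simp only []
  set flat := vk.flatMap (fun p => p.2) with hflat
  set ordered := PySem.List.dedup flat with hordered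
  set lengths := PySem.Set.ofList (ordered.map PySem.Str.len) with hlengths
  set found : PySem.Set (List Char) :=
    lengths.foldl (fun fnd L =>
      (PySem.List.pyRange 0 ((c.length : Int) - L + 1) 1).foldl
        (fun fnd i => PySem.Set.add fnd (PySem.List.slice c (some i) (some (i + L)))) fnd)
      PySem.Set.empty with hfound
  -- A's side: fold over all pairs = fold over the flattened keyword list, then filter-form
  have hA : vk.foldl (fun tags p =>
        p.2.foldl (fun tags kw =>
          if PySem.Chars.isIn kw.toList c && !(tags.contains kw) then tags ++ [kw] else tags) tags) []
      = ordered.filter (fun kw => PySem.Chars.isIn kw.toList c) := by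
    rw [← List.foldl_flatMap, ← hflat]
    calc flat.foldl (fun tags kw =>
            if PySem.Chars.isIn kw.toList c && !(tags.contains kw) then tags ++ [kw] else tags) []
        = flat.foldl (fun tags kw =>
            if PySem.Chars.isIn kw.toList c then PySem.Set.add tags kw else tags) [] := by
          simp only [stepA_eq_add]
      _ = (flat.filter (fun kw => PySem.Chars.isIn kw.toList c)).foldl PySem.Set.add [] := by
          rw [foldl_ite_add]
      _ = (flat.foldl PySem.Set.add []).filter (fun kw => PySem.Chars.isIn kw.toList c) := by
          rw [filter_foldl_add]; rfl
      _ = ordered.filter (fun kw => PySem.Chars.isIn kw.toList c) := by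
          rw [hordered, PySem.List.dedup_eq_ofList, PySem.Set.ofList_eq_foldl]
  rw [hA]
  -- B's side: membership in found agrees with isIn, for every kw in ordered
  refine (List.filter_congr ?_).symm
  intro kw hkw
  rw [Bool.eq_iff_iff]
  constructor
  · intro hcont
    have hmem : kw.toList ∈ found := List.contains_iff_mem.mp hcont
    rw [hfound, mem_found] at hmem
    rcases hmem with h | ⟨L, hL, i, hi, hx⟩
    · simp [PySem.Set.empty] at h
    · have hL0 : 0 ≤ L := by
        rw [hlengths, PySem.Set.mem_ofList] at hL
        obtain ⟨kw', _, rfl⟩ := List.mem_map.mp hL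
        rw [PySem.Str.len_eq]
        exact Int.natCast_nonneg _
      exact found_isIn c kw.toList L i hi hL0 hx
  · intro hisin
    apply List.contains_iff_mem.mpr
    rw [hfound, mem_found]
    obtain ⟨i, hi, hx⟩ := isIn_found c kw.toList hisin
    refine Or.inr ⟨(kw.toList.length : Int), ?_, i, hi, hx⟩
    rw [hlengths, PySem.Set.mem_ofList]
    exact List.mem_map.mpr ⟨kw, hkw, by rw [PySem.Str.len_eq]⟩
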